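-- pv_equiv track=rewrite | github.com/s-valencia/XLS-Diff | # Outlook Final Script.py | sheet_name
-- ===== SOURCE A (Python) =====
-- def sheet_name(filename):
--    if filename.endswith(".xlsx"):
--       filename = filename[:-5]
--
--    words = filename.replace("_", " ").replace("-", " ").split()
--    filtered_words = [word for word in words if word.lower() not in {"pge", "report"}]
--    combined_phrase = " ".join(filtered_words)
--
--    while len(combined_phrase) > 31:
--       filtered_words = filtered_words[:-1]
--       combined_phrase = " ".join(filtered_words)
--
--    return combined_phrase
-- ===== SOURCE B (Python) =====
-- def sheet_name(filename):
--     if filename.endswith(".xlsx"):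
--         filename = filename[:-5]
--     words = filename.replace("_", " ").replace("-", " ").split()
--     filtered_words = [w for w in words if w.lower() not in {"pge", "report"}]
--     result = []
--     total = 0
--     for word in filtered_words:
--         add = len(word) + (1 if result else 0)
--         if total + add > 31:
--             break
--         result.append(word)
--         total += add
--     return " ".join(result)
-- ===== Notes on version B (the rewrite author's own statement) =====
-- stated objective: alternative
-- what changed: Replaced the build-all-then-shrink trimming (re-joining the word list and re-measuring the joined string after dropping each trailing word) with a single forward greedy pass that keeps a running character count and stops at the first word that would push the joined length past 31.
import Mathlib
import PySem

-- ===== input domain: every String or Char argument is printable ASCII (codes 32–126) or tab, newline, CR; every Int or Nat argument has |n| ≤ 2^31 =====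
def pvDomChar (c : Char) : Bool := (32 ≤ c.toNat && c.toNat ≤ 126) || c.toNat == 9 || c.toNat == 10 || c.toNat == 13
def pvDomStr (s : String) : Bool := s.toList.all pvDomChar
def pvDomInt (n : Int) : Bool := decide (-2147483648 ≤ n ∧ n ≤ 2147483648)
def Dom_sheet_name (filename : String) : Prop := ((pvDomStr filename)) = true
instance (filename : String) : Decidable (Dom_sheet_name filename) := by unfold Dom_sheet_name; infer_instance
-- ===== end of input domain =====

-- B replaces A's repeated drop-last-and-rejoin trimming with one forward greedy pass over the
-- filtered words keeping a running character count (objective: alternative single-pass build).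

-- arithmetic form of len(" ".join(ws)); cited by pvTrimA's termination proof
def pvS (ws : List String) : Nat := (ws.map (fun w => w.toList.length)).sum + ws.length - 1

theorem pv_join_len (ws : List String) :
    (PySem.Str.join " " ws).toList.length = pvS ws := by
  rw [PySem.Str.toList_join]
  induction ws with
  | nil => rfl
  | cons w rest ih =>
    cases rest with
    | nil => simp [PySem.Chars.join, pvS, List.intercalate]
    | cons v vs =>
      simp only [List.map_cons] at ih ⊢
      rw [PySem.Chars.join_cons_cons]
      simp only [List.length_append] at ih ⊢
      have hsep : (" ".toList).length = 1 := by decide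
      simp only [pvS, List.map_cons, List.sum_cons, List.length_cons] at ih ⊢
      omega

-- ===== PORT A =====
-- the while loop: re-join and re-measure, dropping the last word, while the phrase exceeds 31
def pvTrimA (filtered_words : List String) : String :=
  if 31 < PySem.Str.len (PySem.Str.join " " filtered_words) then
    pvTrimA filtered_words.dropLast
  else
    PySem.Str.join " " filtered_words
termination_by filtered_words.length
decreasing_by
  rename_i h
  rw [PySem.Str.len_eq, pv_join_len] at h
  cases filtered_words with
  | nil => simp [pvS] at h
  | cons a l => simp

def sheet_name (filename : String) : String :=
  let filename :=
    if PySem.Str.endswith filename ".xlsx" then PySem.Str.slice filename none (some (-5))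
    else filename
  let words := PySem.Str.split₀ ((PySem.Str.replace (PySem.Str.replace filename "_" " ") "-" " "))
  let filtered_words := words.filter
    (fun word => !(PySem.Str.lower word == "pge" || PySem.Str.lower word == "report"))
  pvTrimA filtered_words

-- ===== PORT B =====
-- forward greedy pass: result list + running count; stop at the first word that does not fit
def pvGreedy (result : List String) (total : Int) (ws : List String) : List String :=
  match ws with
  | [] => result
  | word :: rest =>
    let add := PySem.Str.len word + (if result.isEmpty then 0 else 1)
    if 31 < total + add then result
    else pvGreedy (result ++ [word]) (total + add) rest

def sheet_name_alt (filename : String) : String :=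
  let filename :=
    if PySem.Str.endswith filename ".xlsx" then PySem.Str.slice filename none (some (-5))
    else filename
  let words := PySem.Str.split₀ ((PySem.Str.replace (PySem.Str.replace filename "_" " ") "-" " "))
  let filtered_words := words.filter
    (fun word => !(PySem.Str.lower word == "pge" || PySem.Str.lower word == "report"))
  PySem.Str.join " " (pvGreedy [] 0 filtered_words)

-- ===== PRECONDITION & SPEC =====
def Spec_sheet_name (filename : String) (out : String) : Prop := out = sheet_name_alt filename
instance (filename : String) (out : String) : Decidable (Spec_sheet_name filename out) := by unfold Spec_sheet_name; infer_instance

-- ===== CLAIM (what is proved, stated in full; the proofs are below) =====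
def Claim_equal_sheet_name : Prop := ∀ (filename : String), Dom_sheet_name filename → Spec_sheet_name filename (sheet_name filename)

-- ===== LEMMAS AND PROOFS =====

theorem pvGreedy_cons (acc : List String) (total : Int) (w : String) (rest : List String) :
    pvGreedy acc total (w :: rest) =
      if 31 < total + (PySem.Str.len w + if acc.isEmpty then 0 else 1) then acc
      else pvGreedy (acc ++ [w]) (total + (PySem.Str.len w + if acc.isEmpty then 0 else 1)) rest := rfl

theorem pvS_key (acc : List String) (w : String) (total : Int) (htot : total = (pvS acc : Int)) :
    total + ((w.toList.length : Int) + if acc.isEmpty then 0 else 1) = (pvS (acc ++ [w]) : Int) := by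
  subst htot
  cases acc with
  | nil => simp [pvS]
  | cons a l => simp [pvS]; omega

theorem pvS_le_append (p q : List String) : pvS p ≤ pvS (p ++ q) := by
  simp [pvS]
  omega

-- if everything fits, the greedy pass takes all words
theorem pvGreedy_all (ws : List String) : ∀ (acc : List String) (total : Int),
    total = (pvS acc : Int) → (pvS (acc ++ ws) : Int) ≤ 31 →
    pvGreedy acc total ws = acc ++ ws := by
  induction ws with
  | nil => intro acc total _ _; simp [pvGreedy]
  | cons w rest ih =>
    intro acc total htot hle
    have hkey := pvS_key acc w total htot
    have hle' : (pvS (acc ++ [w]) : Int) ≤ 31 := by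
      have h := pvS_le_append (acc ++ [w]) rest
      rw [List.append_assoc, List.singleton_append] at h
      exact le_trans (by exact_mod_cast h) hle
    rw [pvGreedy_cons]
    simp only [PySem.Str.len_eq]
    rw [if_neg (by omega)]
    rw [ih (acc ++ [w]) _ hkey
      (by rw [List.append_assoc, List.singleton_append]; exact hle)]
    simp

-- once the whole phrase overflows, the last word never matters to the greedy pass
theorem pvGreedy_dropLast (ws : List String) : ∀ (acc : List String) (total : Int),
    total = (pvS acc : Int) → total ≤ 31 → 31 < (pvS (acc ++ ws) : Int) →
    pvGreedy acc total ws = pvGreedy acc total ws.dropLast := by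
  induction ws with
  | nil =>
    intro acc total htot hle hbig
    simp only [List.append_nil] at hbig
    omega
  | cons w rest ih =>
    intro acc total htot hle hbig
    have hkey := pvS_key acc w total htot
    cases rest with
    | nil =>
      rw [show (w :: ([] : List String)).dropLast = [] from rfl]
      rw [pvGreedy_cons]
      simp only [PySem.Str.len_eq]
      rw [if_pos (by omega)]
      rfl
    | cons v vs =>
      rw [show (w :: v :: vs).dropLast = w :: (v :: vs).dropLast from rfl]
      conv_lhs => rw [pvGreedy_cons]
      conv_rhs => rw [pvGreedy_cons]
      simp only [PySem.Str.len_eq]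
      by_cases hc : 31 < total + ((w.toList.length : Int) + if acc.isEmpty then 0 else 1)
      · rw [if_pos hc, if_pos hc]
      · rw [if_neg hc, if_neg hc]
        apply ih (acc ++ [w]) _ hkey (by omega)
        rw [List.append_assoc, List.singleton_append]
        exact hbig

theorem pvTrimA_eq (ws : List String) : pvTrimA ws = PySem.Str.join " " (pvGreedy [] 0 ws) := by
  fun_induction pvTrimA ws with
  | case1 ws hgt ih =>
    rw [PySem.Str.len_eq, pv_join_len] at hgt
    rw [ih, ← pvGreedy_dropLast ws [] 0 rfl (by norm_num) (by simpa using hgt)]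
  | case2 ws hle =>
    rw [PySem.Str.len_eq, pv_join_len, not_lt] at hle
    rw [pvGreedy_all ws [] 0 rfl (by simpa using hle)]
    simp

-- ===== VERDICT (by name: the statement is the Claim_ definition above) =====
theorem sheet_name_spec : Claim_equal_sheet_name := by
  intro filename _
  unfold Spec_sheet_name
  simp only [sheet_name, sheet_name_alt]
  exact pvTrimA_eq _
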